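-- pv_equiv track=rewrite | github.com/BrianMills2718/agent_ontology | agent_ontology/complexity.py | compute_fan_out
-- ===== SOURCE A (Python) =====
-- from collections import defaultdict
--
-- def compute_fan_out(spec):
--     """4. Max outgoing flow edges from any single process node."""
--     edges = spec.get("edges", [])
--     flow_edges = [e for e in edges if e.get("type") == "flow"]
--     out_degree = defaultdict(int)
--     for e in flow_edges:
--         src = e.get("from", "")
--         out_degree[src] += 1
--     if not out_degree:
--         return 0
--     return max(out_degree.values())
-- ===== SOURCE B (Python) =====
-- def compute_fan_out(spec):
--     """4. Max outgoing flow edges from any single process node."""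
--     edges = spec.get("edges", [])
--     sources = [e.get("from", "") for e in edges if e.get("type") == "flow"]
--     best = 0
--     while sources:
--         s = sources[0]
--         rest = [x for x in sources if x != s]
--         best = max(best, len(sources) - len(rest))
--         sources = rest
--     return best
-- ===== Notes on version B (the rewrite author's own statement) =====
-- stated objective: alternative
-- what changed: Replaces the defaultdict tally plus max-over-values with a partition-and-remove loop: repeatedly strip every occurrence of the first remaining source and take the length drop as that source's multiplicity, tracking the running maximum; no counting table is built.
import Mathlib
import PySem

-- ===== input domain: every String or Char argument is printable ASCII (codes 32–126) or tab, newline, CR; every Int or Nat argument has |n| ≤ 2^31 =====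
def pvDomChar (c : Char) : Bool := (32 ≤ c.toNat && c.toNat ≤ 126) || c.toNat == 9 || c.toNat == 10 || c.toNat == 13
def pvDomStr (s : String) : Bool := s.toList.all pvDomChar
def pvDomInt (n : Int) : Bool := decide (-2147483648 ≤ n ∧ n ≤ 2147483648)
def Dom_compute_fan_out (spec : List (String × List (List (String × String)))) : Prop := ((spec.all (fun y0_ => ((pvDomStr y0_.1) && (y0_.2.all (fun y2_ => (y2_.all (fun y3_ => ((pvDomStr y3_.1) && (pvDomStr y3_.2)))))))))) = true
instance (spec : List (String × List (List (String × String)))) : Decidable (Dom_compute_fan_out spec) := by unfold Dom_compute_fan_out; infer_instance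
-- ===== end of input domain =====

-- B replaces A's defaultdict tally + max-over-values with a partition-and-remove
-- loop (strip all occurrences of the first remaining source, multiplicity =
-- length drop, track the running maximum); objective: alternative.

-- shared helper: Python d.get(k, dflt) on an association list (first match)
def pyGetDflt {α : Type} (d : List (String × α)) (k : String) (dflt : α) : α :=
  match d.find? (fun p => p.1 == k) with
  | some p => p.2
  | none => dflt

-- shared helper: Python d.get(k) (default None)
def pyGetOpt {α : Type} (d : List (String × α)) (k : String) : Option α :=
  (d.find? (fun p => p.1 == k)).map (·.2)

-- ===== PORT A =====
def compute_fan_out (spec : List (String × List (List (String × String)))) : Int :=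
  let edges := pyGetDflt spec "edges" []
  let flow_edges := edges.filter (fun e => pyGetOpt e "type" == some "flow")
  let out_degree := flow_edges.foldl
    (fun d e =>
      let src := pyGetDflt e "from" ""
      d.insert src (d.getD src 0 + 1))
    (PySem.Dict.empty : PySem.Dict String Int)
  if out_degree.items.isEmpty then 0
  else PySem.List.maxD out_degree.values (fun v => v) 0   -- max(values); nonempty here, default unused

-- ===== PORT B =====
-- the while loop of Source B: strip all occurrences of sources[0], record len drop
def fanLoop : List String → Int → Int
  | [], best => best
  | s :: tl, best =>
      let rest := (s :: tl).filter (fun x => x ≠ s)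
      fanLoop rest (max best (((s :: tl).length : Int) - (rest.length : Int)))
termination_by l _ => l.length
decreasing_by
  have h : (s :: tl).filter (fun x => x ≠ s) = tl.filter (fun x => x ≠ s) := by simp
  rw [h]
  exact Nat.lt_succ_of_le (List.length_filter_le _ _)

def compute_fan_out_alt (spec : List (String × List (List (String × String)))) : Int :=
  let edges := pyGetDflt spec "edges" []
  let sources := (edges.filter (fun e => pyGetOpt e "type" == some "flow")).map
    (fun e => pyGetDflt e "from" "")
  fanLoop sources 0

-- ===== PRECONDITION & SPEC =====
def Spec_compute_fan_out (spec : List (String × List (List (String × String)))) (out : Int) : Prop := out = compute_fan_out_alt spec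
instance (spec : List (String × List (List (String × String)))) (out : Int) : Decidable (Spec_compute_fan_out spec out) := by unfold Spec_compute_fan_out; infer_instance

-- ===== CLAIM (what is proved, stated in full; the proofs are below) =====
def Claim_equal_compute_fan_out : Prop := ∀ (spec : List (String × List (List (String × String)))), Dom_compute_fan_out spec → Spec_compute_fan_out spec (compute_fan_out spec)

-- ===== LEMMAS AND PROOFS =====

-- ---- generic facts about foldl max over Int ----
lemma le_foldl_max (b : Int) (l : List Int) : b ≤ List.foldl max b l := by
  induction l generalizing b with
  | nil => simp
  | cons x xs ih => exact le_trans (le_max_left b x) (ih _)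

lemma mem_le_foldl_max (b : Int) (l : List Int) (z : Int) (hz : z ∈ l) :
    z ≤ List.foldl max b l := by
  induction l generalizing b with
  | nil => simp at hz
  | cons x xs ih =>
    rcases List.mem_cons.mp hz with h | h
    · subst h; exact le_trans (le_max_right b z) (le_foldl_max _ _)
    · exact ih _ h

lemma foldl_max_le (b c : Int) (l : List Int) (hb : b ≤ c) (hl : ∀ z ∈ l, z ≤ c) :
    List.foldl max b l ≤ c := by
  induction l generalizing b with
  | nil => simpa
  | cons x xs ih =>
    exact ih _ (max_le hb (hl x List.mem_cons_self)) (fun z hz => hl z (List.mem_cons_of_mem _ hz))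

-- ---- A-side: max? / maxD facts ----
lemma maxD_eq_foldl_max (l : List Int) (hpos : ∀ z ∈ l, 0 ≤ z) :
    PySem.List.maxD l (fun v => v) 0 = List.foldl max 0 l := by
  cases l with
  | nil => rfl
  | cons x xs =>
    unfold PySem.List.maxD
    rw [PySem.List.max?_id_cons]
    simp only [Option.getD_some, List.foldl_cons]
    rw [max_eq_right (hpos x List.mem_cons_self)]

-- A's counting loop over edges, keyed by source, builds Counter(sources)
lemma counter_fold_key {a : Type} (key : a -> String) (l : List a) :
    l.foldl (fun d e => d.insert (key e) (d.getD (key e) 0 + 1))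
      (PySem.Dict.empty : PySem.Dict String Int)
      = PySem.Dict.counter (l.map key) := by
  rw [<- PySem.Dict.foldl_insert_getD_add_one_eq_counter, List.foldl_map]

-- A's tail on Counter(sources) = foldl max 0 over per-source counts
lemma counter_max_eq_foldl_count (sources : List String) :
    (if (PySem.Dict.counter sources).items.isEmpty then (0 : Int)
     else PySem.List.maxD (PySem.Dict.counter sources).values (fun v => v) 0)
    = List.foldl max 0 (sources.map (fun s => (sources.count s : Int))) := by
  have hitems := PySem.Dict.items_counter sources
  have hvals : (PySem.Dict.counter sources).values
      = (PySem.Set.ofList sources : List String).map (fun k => (sources.count k : Int)) := by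
    simp only [PySem.Dict.values, hitems, List.map_map]
    rfl
  by_cases hs : sources = []
  · subst hs; rfl
  · have hne : (PySem.Dict.counter sources).items ≠ [] := by
      rw [hitems]
      cases sources with
      | nil => exact absurd rfl hs
      | cons x xs =>
        have hx : x ∈ PySem.Set.ofList (x :: xs) :=
          (PySem.Set.mem_ofList _ x).mpr List.mem_cons_self
        intro h
        rw [List.map_eq_nil_iff] at h
        rw [h] at hx; simp at hx
    rw [if_neg (by simpa using hne)]
    rw [maxD_eq_foldl_max _ (by
      rw [hvals]; intro z hz
      rcases List.mem_map.mp hz with ⟨k, _, rfl⟩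
      exact Int.natCast_nonneg _)]
    -- both sides are foldl max 0 over lists with the same membership; antisymmetry
    apply le_antisymm
    · refine foldl_max_le _ _ _ (le_foldl_max _ _) ?_
      intro z hz
      rw [hvals] at hz
      rcases List.mem_map.mp hz with ⟨k, hk, rfl⟩
      have hk' : k ∈ sources := (PySem.Set.mem_ofList _ k).mp hk
      exact mem_le_foldl_max _ _ _ (List.mem_map.mpr ⟨k, hk', rfl⟩)
    · refine foldl_max_le _ _ _ (le_foldl_max _ _) ?_
      intro z hz
      rcases List.mem_map.mp hz with ⟨k, hk, rfl⟩
      have hk' : k ∈ PySem.Set.ofList sources := (PySem.Set.mem_ofList _ k).mpr hk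
      exact mem_le_foldl_max 0 _ _ (by rw [hvals]; exact List.mem_map.mpr ⟨k, hk', rfl⟩)

-- ---- B-side: the partition-and-remove loop computes foldl max over counts ----
lemma fanLoop_eq_foldl (l : List String) (best : Int) :
    fanLoop l best = List.foldl max best (l.map (fun s => (l.count s : Int))) := by
  generalize hn : l.length = n
  induction n using Nat.strong_induction_on generalizing l best with
  | _ n ih =>
  cases l with
  | nil => simp [fanLoop]
  | cons x xs =>
    rw [fanLoop]
    have hfl : (x :: xs).filter (fun y => y ≠ x) = xs.filter (fun y => y ≠ x) := by simp
    set rest := xs.filter (fun y => y ≠ x) with hrest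
    -- length accounting: the drop equals the multiplicity of x
    have key : ∀ (ys : List String), ys.count x + (ys.filter (fun y => y ≠ x)).length = ys.length := by
      intro ys
      induction ys with
      | nil => simp
      | cons z zs ihz =>
        simp only [decide_not] at ihz ⊢
        simp only [List.count_cons, List.filter_cons, List.length_cons]
        by_cases h : z = x
        · subst h
          simp only [beq_self_eq_true, decide_true, Bool.not_true, Bool.false_eq_true, if_false,
            if_true]
          omega
        · have hzx : (z == x) = false := beq_eq_false_iff_ne.mpr h
          have hd : (decide (z = x)) = false := decide_eq_false h
          simp only [hzx, hd, Bool.not_false, if_true, Bool.false_eq_true, if_false,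
            List.length_cons]
          omega
    have hlen : (x :: xs).length = (x :: xs).count x + rest.length := by
      have hk := key xs
      simp only [List.count_cons_self, List.length_cons, hrest]
      omega
    have hc : ((x :: xs).length : Int) - (rest.length : Int) = ((x :: xs).count x : Int) := by
      rw [hlen]; push_cast; ring
    rw [hfl, hc]
    -- counts inside rest agree with counts in the full list
    have hcounts : rest.map (fun y => (rest.count y : Int))
        = rest.map (fun y => ((x :: xs).count y : Int)) := by
      apply List.map_congr_left
      intro y hy
      have hyx : y ≠ x := by
        have := (List.mem_filter.mp (hrest ▸ hy)).2
        simpa using this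
      have h1 : rest.count y = xs.count y := by
        rw [hrest, List.count_filter]
        simp [hyx]
      have h2 : (x :: xs).count y = xs.count y := by
        simp [Ne.symm hyx]
      simp [h1, h2]
    have hlt : rest.length < n := by
      rw [← hn]
      exact Nat.lt_succ_of_le (List.length_filter_le _ _)
    rw [ih rest.length hlt rest _ rfl, hcounts]
    -- both sides are the sup of best, the count of x, and the counts over rest / x :: xs
    apply le_antisymm
    · refine foldl_max_le _ _ _ ?_ ?_
      · exact max_le (le_foldl_max _ _)
          (mem_le_foldl_max best _ _ (List.mem_map.mpr ⟨x, List.mem_cons_self, rfl⟩))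
      · intro z hz
        rcases List.mem_map.mp hz with ⟨y, hy, rfl⟩
        have : y ∈ x :: xs := List.mem_cons_of_mem _ (List.mem_filter.mp (hrest ▸ hy)).1
        exact mem_le_foldl_max _ _ _ (List.mem_map.mpr ⟨y, this, rfl⟩)
    · refine foldl_max_le _ _ _ (le_trans (le_max_left _ _) (le_foldl_max _ _)) ?_
      intro z hz
      rcases List.mem_map.mp hz with ⟨y, hy, rfl⟩
      by_cases hyx : y = x
      · subst hyx
        exact le_trans (le_max_right _ _) (le_foldl_max _ _)
      · have hyxs : y ∈ xs := by
          rcases List.mem_cons.mp hy with h | h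
          · exact absurd h hyx
          · exact h
        have hyr : y ∈ rest := by
          rw [hrest]; exact List.mem_filter.mpr ⟨hyxs, by simpa using hyx⟩
        exact mem_le_foldl_max _ _ _ (List.mem_map.mpr ⟨y, hyr, rfl⟩)

-- ===== VERDICT (by name: the statement is the Claim_ definition above) =====
theorem compute_fan_out_spec : Claim_equal_compute_fan_out := by
  intro spec _
  unfold Spec_compute_fan_out compute_fan_out compute_fan_out_alt
  simp only [counter_fold_key, fanLoop_eq_foldl]
  exact counter_max_eq_foldl_count _
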